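-- pv_equiv track=rewrite | github.com/laiarodrigo/Thesis | src/opus_pipeline.py | _shard_ranges
-- ===== SOURCE A (Python) =====
-- def _shard_ranges(lo, hi, n):
--     size = hi - lo + 1
--     base, rem = divmod(size, n)
--     out = []
--     s = lo
--     for i in range(n):
--         e = s + base - 1 + (1 if i < rem else 0)
--         out.append((s, e))
--         s = e + 1
--     return out
-- ===== SOURCE B (Python) =====
-- def _shard_ranges(lo, hi, n):
--     base, rem = divmod(hi - lo + 1, n)
--     return [(lo + i * base + min(i, rem),
--              lo + i * base + min(i, rem) + base - 1 + (1 if i < rem else 0))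
--             for i in range(n)]
-- ===== Notes on version B (the rewrite author's own statement) =====
-- stated objective: alternative
-- what changed: Replaced A's sequential running-start accumulator loop with a closed-form per-index computation (start = lo + i*base + min(i, rem)) in a comprehension; divmod(hi-lo+1, n) is kept verbatim.
import Mathlib
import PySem

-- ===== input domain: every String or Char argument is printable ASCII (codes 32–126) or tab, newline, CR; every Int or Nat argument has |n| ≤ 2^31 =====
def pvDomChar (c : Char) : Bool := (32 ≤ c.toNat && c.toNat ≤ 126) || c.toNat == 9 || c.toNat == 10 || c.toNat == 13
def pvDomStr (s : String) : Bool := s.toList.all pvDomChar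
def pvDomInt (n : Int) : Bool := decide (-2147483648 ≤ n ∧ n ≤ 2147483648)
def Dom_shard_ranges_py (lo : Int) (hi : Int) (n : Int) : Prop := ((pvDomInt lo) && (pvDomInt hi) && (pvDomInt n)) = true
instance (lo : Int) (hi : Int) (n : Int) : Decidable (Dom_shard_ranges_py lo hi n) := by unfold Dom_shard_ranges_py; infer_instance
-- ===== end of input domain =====

-- B replaces A's running-start accumulator with a closed-form per-index bound computation (alternative decomposition, same cost).

-- ===== PORT A =====
def shard_ranges_py (lo : Int) (hi : Int) (n : Int) : List (Int × Int) :=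
  let size := hi - lo + 1
  match PySem.Int.divmod? size n with
  | none => []   -- n = 0: Python raises ZeroDivisionError; excluded by Pre_
  | some (base, rem) =>
    ((PySem.List.pyRange 0 n 1).foldl
      (fun (st : List (Int × Int) × Int) i =>
        let e := st.2 + base - 1 + (if i < rem then 1 else 0)
        (st.1 ++ [(st.2, e)], e + 1))
      ([], lo)).1

-- ===== PORT B =====
def shard_ranges_py_alt (lo : Int) (hi : Int) (n : Int) : List (Int × Int) :=
  match PySem.Int.divmod? (hi - lo + 1) n with
  | none => []   -- n = 0: Python raises ZeroDivisionError; excluded by Pre_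
  | some (base, rem) =>
    (PySem.List.pyRange 0 n 1).map (fun i =>
      (lo + i * base + min i rem,
       lo + i * base + min i rem + base - 1 + (if i < rem then 1 else 0)))

-- ===== PRECONDITION & SPEC =====
-- Pre_ excludes only n = 0, where Python's divmod raises ZeroDivisionError.
def Pre_shard_ranges_py (lo : Int) (hi : Int) (n : Int) : Prop := n ≠ 0
instance (lo : Int) (hi : Int) (n : Int) : Decidable (Pre_shard_ranges_py lo hi n) := by unfold Pre_shard_ranges_py; infer_instance
def pvWitness_shard_ranges_py : Int × Int × Int := (0, 9, 3)

def Spec_shard_ranges_py (lo : Int) (hi : Int) (n : Int) (out : List (Int × Int)) : Prop := out = shard_ranges_py_alt lo hi n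
instance (lo : Int) (hi : Int) (n : Int) (out : List (Int × Int)) : Decidable (Spec_shard_ranges_py lo hi n out) := by unfold Spec_shard_ranges_py; infer_instance

-- ===== CLAIM (what is proved, stated in full; the proofs are below) =====
def Claim_equal_shard_ranges_py : Prop := ∀ (lo : Int) (hi : Int) (n : Int), Dom_shard_ranges_py lo hi n → Pre_shard_ranges_py lo hi n → Spec_shard_ranges_py lo hi n (shard_ranges_py lo hi n)

-- ===== LEMMAS AND PROOFS =====

-- Loop invariant: folding A's body over range N yields B's closed-form shards and final start lo + N*base + min N rem.
lemma shard_loop_eq (lo base rem : Int) (hrem : 0 ≤ rem) : ∀ N : Nat,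
    (List.range N).foldl
      (fun (st : List (Int × Int) × Int) (k : Nat) =>
        let e := st.2 + base - 1 + (if (0 : Int) + k < rem then 1 else 0)
        (st.1 ++ [(st.2, e)], e + 1))
      ([], lo)
    = ((List.range N).map (fun (k : Nat) =>
         (lo + ((0 : Int) + k) * base + min ((0 : Int) + k) rem,
          lo + ((0 : Int) + k) * base + min ((0 : Int) + k) rem + base - 1
            + (if (0 : Int) + k < rem then 1 else 0))),
       lo + N * base + min (N : Int) rem) := by
  intro N
  induction N with
  | zero => simp [min_eq_left hrem]
  | succ N ih =>
    rw [List.range_succ, List.foldl_append, List.map_append, ih]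
    simp only [List.foldl_cons, List.foldl_nil, Prod.mk.injEq]
    refine ⟨by simp, ?_⟩
    · split_ifs with h
      · push_cast
        nlinarith [min_eq_left (le_of_lt (by omega : (N : Int) < rem)),
                   min_eq_left (show ((N : Int) + 1) ≤ rem by omega)]
      · push_cast
        nlinarith [min_eq_right (show rem ≤ (N : Int) by omega),
                   min_eq_right (show rem ≤ (N : Int) + 1 by omega)]

theorem shard_ranges_py_spec_aux (lo hi n : Int) (hn : n ≠ 0) :
    shard_ranges_py lo hi n = shard_ranges_py_alt lo hi n := by
  unfold shard_ranges_py shard_ranges_py_alt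
  simp only [PySem.Int.divmod?]
  split_ifs with h
  · exact absurd h hn
  · rcases lt_or_gt_of_ne hn with hneg | hpos
    · simp [PySem.List.pyRange_one, Int.toNat_of_nonpos (le_of_lt hneg)]
    · simp only [PySem.List.pyRange_one, Int.sub_zero, List.foldl_map, List.map_map]
      refine Eq.trans (congrArg Prod.fst
        (shard_loop_eq lo ((hi - lo + 1).fdiv n) ((hi - lo + 1).fmod n)
          (by have := PySem.Int.mod_nonneg (a := hi - lo + 1) (b := n) hpos; simpa [PySem.Int.mod] using this) n.toNat)) ?_
      simp [Function.comp]

-- ===== VERDICT (by name: the statement is the Claim_ definition above) =====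
theorem shard_ranges_py_spec : Claim_equal_shard_ranges_py := by
  intro lo hi n _ hn
  unfold Spec_shard_ranges_py
  exact shard_ranges_py_spec_aux lo hi n hn
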